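-- pv_equiv track=rewrite | github.com/AniGerm/IrrigationPro | tools/convert_legacy_setup_to_backup.py | _normalize_months
-- ===== SOURCE A (Python) =====
-- MONTH_MAP = {
--     "jan": 1,
--     "feb": 2,
--     "mar": 3,
--     "apr": 4,
--     "may": 5,
--     "jun": 6,
--     "jul": 7,
--     "aug": 8,
--     "sep": 9,
--     "oct": 10,
--     "nov": 11,
--     "dec": 12,
-- }
--
-- def _normalize_months(values: list[str] | None) -> list[int]:
--     out: list[int] = []
--     for item in values or []:
--         key = str(item).strip().lower()[:3]
--         m = MONTH_MAP.get(key)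
--         if m:
--             out.append(m)
--     return sorted(set(out)) or list(range(1, 13))
-- ===== SOURCE B (Python) =====
-- MONTH_MAP = {
--     "jan": 1,
--     "feb": 2,
--     "mar": 3,
--     "apr": 4,
--     "may": 5,
--     "jun": 6,
--     "jul": 7,
--     "aug": 8,
--     "sep": 9,
--     "oct": 10,
--     "nov": 11,
--     "dec": 12,
-- }
--
-- def _normalize_months(values):
--     keys = {str(item).strip().lower()[:3] for item in (values or [])}
--     out = [m for name, m in MONTH_MAP.items() if name in keys]
--     return out or list(range(1, 13))
-- ===== Notes on version B (the rewrite author's own statement) =====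
-- stated objective: alternative
-- what changed: Instead of collecting hits per input item and then sorting a set, B builds the set of normalized keys once and walks the 12 canonical months in fixed order, so the result is sorted and unique by construction with no sort call.
import Mathlib
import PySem

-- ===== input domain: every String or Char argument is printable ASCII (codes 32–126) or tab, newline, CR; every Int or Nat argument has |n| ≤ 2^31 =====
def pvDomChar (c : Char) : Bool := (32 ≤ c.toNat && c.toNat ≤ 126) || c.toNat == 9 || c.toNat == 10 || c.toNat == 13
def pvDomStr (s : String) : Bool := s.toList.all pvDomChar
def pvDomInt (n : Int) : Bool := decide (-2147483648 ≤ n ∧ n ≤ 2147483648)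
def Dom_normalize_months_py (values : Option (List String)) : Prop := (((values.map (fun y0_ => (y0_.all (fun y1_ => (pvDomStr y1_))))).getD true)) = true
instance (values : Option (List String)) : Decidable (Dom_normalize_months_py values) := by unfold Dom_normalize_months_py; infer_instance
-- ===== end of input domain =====

-- B iterates the 12 canonical months in fixed order against a set of normalized keys,
-- so the result is sorted and unique by construction (no sort call); same values as A everywhere.

-- shared module constant MONTH_MAP (a dict literal with 12 distinct keys)
def monthPairs : List (String × Int) :=
  [("jan", 1), ("feb", 2), ("mar", 3), ("apr", 4), ("may", 5), ("jun", 6),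
   ("jul", 7), ("aug", 8), ("sep", 9), ("oct", 10), ("nov", 11), ("dec", 12)]

def MONTH_MAP : PySem.Dict String Int := PySem.Dict.mk monthPairs

-- str(item).strip().lower()[:3]  (str() on a str is the identity)
def keyOf (item : String) : String :=
  PySem.Str.slice (PySem.Str.lower (PySem.Str.strip item)) none (some 3)

-- ===== PORT A =====
def normalize_months_py (values : Option (List String)) : List Int :=
  let out : List Int :=
    (values.getD []).foldl
      (fun out item =>
        match MONTH_MAP.get? (keyOf item) with
        | some m => if m ≠ 0 then out ++ [m] else out   -- 'if m:' — truthy int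
        | none => out)
      []
  let res := PySem.List.sorted (PySem.Set.ofList out) (fun x => x) false
  if res = [] then PySem.List.pyRange 1 13 1 else res

-- ===== PORT B =====
def normalize_months_py_alt (values : Option (List String)) : List Int :=
  let keys : PySem.Set String := PySem.Set.ofList ((values.getD []).map keyOf)
  let out : List Int := (MONTH_MAP.items.filter (fun p => PySem.Set.contains keys p.1)).map (fun p => p.2)
  if out = [] then PySem.List.pyRange 1 13 1 else out

-- ===== PRECONDITION & SPEC =====
def Spec_normalize_months_py (values : Option (List String)) (out : List Int) : Prop := out = normalize_months_py_alt values
instance (values : Option (List String)) (out : List Int) : Decidable (Spec_normalize_months_py values out) := by unfold Spec_normalize_months_py; infer_instance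

-- ===== CLAIM (what is proved, stated in full; the proofs are below) =====
def Claim_equal_normalize_months_py : Prop := ∀ (values : Option (List String)), Dom_normalize_months_py values → Spec_normalize_months_py values (normalize_months_py values)

-- ===== LEMMAS AND PROOFS =====

-- per-item contribution of A's loop
def hitOf (item : String) : List Int :=
  match MONTH_MAP.get? (keyOf item) with
  | some m => if m ≠ 0 then [m] else []
  | none => []

lemma outA_eq_flatMap (l : List String) :
    l.foldl
      (fun out item =>
        match MONTH_MAP.get? (keyOf item) with
        | some m => if m ≠ 0 then out ++ [m] else out
        | none => out)
      [] = l.flatMap hitOf := by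
  have h : (fun (out : List Int) (item : String) =>
      match MONTH_MAP.get? (keyOf item) with
      | some m => if m ≠ 0 then out ++ [m] else out
      | none => out) = fun out item => out ++ hitOf item := by
    funext out item
    unfold hitOf
    cases MONTH_MAP.get? (keyOf item) with
    | none => simp
    | some m => by_cases hm : m = 0 <;> simp [hm]
  rw [h, PySem.List.foldl_append_eq_flatMap]
  simp

lemma get?_mk_eq_some (ps : List (String × Int)) (hnd : (ps.map Prod.fst).Nodup)
    (k : String) (m : Int) :
    (PySem.Dict.mk ps).get? k = some m ↔ (k, m) ∈ ps := by
  induction ps with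
  | nil => simp [PySem.Dict.get?]
  | cons p rest ih =>
    obtain ⟨a, b⟩ := p
    simp only [List.map_cons, List.nodup_cons, List.mem_map] at hnd
    rw [PySem.Dict.get?_mk_cons]
    by_cases hak : a = k
    · subst hak
      simp only [BEq.rfl, if_pos, List.mem_cons, Option.some.injEq]
      constructor
      · rintro rfl; exact Or.inl rfl
      · rintro (h | h)
        · exact (Prod.mk.injEq .. ▸ h).2.symm
        · exact absurd ⟨(a, m), h, rfl⟩ hnd.1
    · simp only [beq_iff_eq, if_neg hak, List.mem_cons]
      rw [ih hnd.2]
      constructor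
      · exact Or.inr
      · rintro (h | h)
        · exact absurd (Prod.mk.injEq .. ▸ h).1.symm hak
        · exact h

lemma get?_month (k : String) (m : Int) :
    MONTH_MAP.get? k = some m ↔ (k, m) ∈ monthPairs :=
  get?_mk_eq_some monthPairs (by decide) k m

lemma month_val_ne_zero : ∀ p ∈ monthPairs, p.2 ≠ (0 : Int) := by decide

lemma mem_hitOf (item : String) (m : Int) :
    m ∈ hitOf item ↔ (keyOf item, m) ∈ monthPairs := by
  unfold hitOf
  cases hd : MONTH_MAP.get? (keyOf item) with
  | none =>
    simp only [List.not_mem_nil, false_iff]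
    intro hmem
    exact absurd ((get?_month _ _).2 hmem) (by simp [hd])
  | some v =>
    have hv : (keyOf item, v) ∈ monthPairs := (get?_month _ _).1 hd
    have hv0 : v ≠ 0 := month_val_ne_zero _ hv
    simp only [if_pos hv0, List.mem_singleton]
    constructor
    · rintro rfl; exact hv
    · intro hmem
      have := (get?_month _ _).2 hmem
      rw [hd] at this
      exact (Option.some.injEq .. ▸ this).symm

lemma mem_outA (l : List String) (m : Int) :
    m ∈ l.flatMap hitOf ↔ ∃ p ∈ monthPairs, p.2 = m ∧ p.1 ∈ l.map keyOf := by
  simp only [List.mem_flatMap, List.mem_map, mem_hitOf]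
  constructor
  · rintro ⟨item, hitem, hm⟩
    exact ⟨(keyOf item, m), hm, rfl, item, hitem, rfl⟩
  · rintro ⟨⟨k, v⟩, hp, rfl, item, hitem, rfl⟩
    exact ⟨item, hitem, hp⟩

lemma mem_outB (l : List String) (m : Int) :
    m ∈ (monthPairs.filter (fun p => PySem.Set.contains (PySem.Set.ofList (l.map keyOf)) p.1)).map (fun p => p.2)
      ↔ ∃ p ∈ monthPairs, p.2 = m ∧ p.1 ∈ l.map keyOf := by
  simp only [List.mem_map, List.mem_filter, PySem.Set.contains]
  constructor
  · rintro ⟨p, ⟨hp, hc⟩, rfl⟩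
    refine ⟨p, hp, rfl, ?_⟩
    have := List.contains_iff_mem.mp hc
    simpa [PySem.Set.mem_ofList] using this
  · rintro ⟨p, hp, rfl, hmem⟩
    refine ⟨p, ⟨hp, ?_⟩, rfl⟩
    exact List.contains_iff_mem.mpr (by simpa [PySem.Set.mem_ofList] using hmem)

-- B's filtered list is strictly increasing
lemma pairwise_outB (l : List String) :
    ((monthPairs.filter (fun p => PySem.Set.contains (PySem.Set.ofList (l.map keyOf)) p.1)).map (fun p => p.2)).Pairwise (· < ·) := by
  apply List.Pairwise.map (S := fun a b : Int => a < b) _ (fun a b h => h)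
  exact List.Pairwise.filter _ (by decide)

-- B's filtered list has no duplicates
lemma nodup_outB (l : List String) :
    ((monthPairs.filter (fun p => PySem.Set.contains (PySem.Set.ofList (l.map keyOf)) p.1)).map (fun p => p.2)).Nodup :=
  (pairwise_outB l).imp (fun h => by omega) |>.nodup

lemma core_eq (l : List String) :
    PySem.List.sorted (PySem.Set.ofList (l.flatMap hitOf)) (fun x => x) false
      = (monthPairs.filter (fun p => PySem.Set.contains (PySem.Set.ofList (l.map keyOf)) p.1)).map (fun p => p.2) := by
  apply PySem.List.sorted_eq_of_perm_of_pairwise_lt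
  · rw [List.perm_ext_iff_of_nodup (nodup_outB l) (PySem.Set.nodup_ofList _)]
    intro m
    rw [mem_outB, PySem.Set.mem_ofList, mem_outA]
  · simpa using pairwise_outB l

-- ===== VERDICT (by name: the statement is the Claim_ definition above) =====
theorem normalize_months_py_spec : Claim_equal_normalize_months_py := by
  intro values _
  show normalize_months_py values = normalize_months_py_alt values
  simp only [normalize_months_py, normalize_months_py_alt, outA_eq_flatMap, core_eq]
  rfl
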